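-- pv_equiv track=rewrite | github.com/podomin/leethub_training | 1629-slowest-key/1629-slowest-key.py | slowestKey
-- ===== SOURCE A (Python) =====
-- from typing import List
--
-- def slowestKey(releaseTimes: List[int], keysPressed: str) -> str:
--     from collections import defaultdict
--     dic = defaultdict(int)
--     prev = 0
--     for i, time in enumerate(releaseTimes):
--         duration = time - prev
--         prev = time
--         dic[keysPressed[i]] = max(dic[keysPressed[i]], duration)
--     ansser = ""
--     cur_max = 0
--     for k,v in dic.items():
--         if v > cur_max:
--             answer = k
--             cur_max = v
--         elif v == cur_max and answer < k:
--             answer = k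
--     return answer
-- ===== SOURCE B (Python) =====
-- def slowestKey(releaseTimes, keysPressed):
--     # Single pass keeping only three scalars: the previous release time, the best
--     # duration so far, and the current answer key (no dict, no second scan).
--     answer = ""
--     cur_max = 0
--     prev = 0
--     for i, time in enumerate(releaseTimes):
--         duration = time - prev
--         prev = time
--         key = keysPressed[i]
--         if duration > cur_max:
--             answer = key
--             cur_max = duration
--         elif duration == cur_max and answer < key:
--             answer = key
--     return answer
-- ===== Notes on version B (the rewrite author's own statement) =====
-- stated objective: simpler
-- what changed: B replaces A's defaultdict per-key max aggregation followed by a second scan over the dict items with a single pass over the presses that keeps only three scalars (previous release time, best duration, current answer key).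
-- crash fix: When no press of the first key has positive duration (including the empty list) A raises NameError on its unbound 'answer' while B returns the single-pass winner (or "" for the empty list); when keysPressed is shorter than releaseTimes both raise IndexError. — e.g. on slowestKey([-1, 2], "ab"): A raises UnboundLocalError, B returns "b"
import Mathlib
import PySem

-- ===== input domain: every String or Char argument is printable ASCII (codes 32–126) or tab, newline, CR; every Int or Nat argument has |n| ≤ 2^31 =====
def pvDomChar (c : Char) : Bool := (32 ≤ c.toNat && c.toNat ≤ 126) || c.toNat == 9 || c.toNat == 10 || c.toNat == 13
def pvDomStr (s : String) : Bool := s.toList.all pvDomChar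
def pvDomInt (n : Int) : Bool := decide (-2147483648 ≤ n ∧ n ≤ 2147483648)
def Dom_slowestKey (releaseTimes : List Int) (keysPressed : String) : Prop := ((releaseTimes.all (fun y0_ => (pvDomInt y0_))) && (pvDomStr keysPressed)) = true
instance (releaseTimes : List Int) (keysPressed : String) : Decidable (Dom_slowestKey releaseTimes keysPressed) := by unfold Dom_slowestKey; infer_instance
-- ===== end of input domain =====

-- B replaces A's defaultdict per-key aggregation + second scan over dict items by a single
-- pass keeping three scalars (simpler, same O(n) cost).

-- ===== PORT A =====
def slowestKey (releaseTimes : List Int) (keysPressed : String) : String :=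
  -- for i, time in enumerate(releaseTimes): dic[keysPressed[i]] = max(dic[keysPressed[i]], time - prev)
  -- then the second loop over dic.items(); Python's 'answer' is unbound until first set —
  -- under Pre_ the first dict item has a positive value, so answer is set there and the
  -- "" initial state only stands in for the (never read) unbound state
  ((((PySem.List.enumerate releaseTimes 0).foldl
      (fun (st : PySem.Dict Char Int × Int) (p : Int × Int) =>
        match PySem.Str.pyGet? keysPressed p.1 with
        | some k => (st.1.insert k (max (st.1.getD k 0) (p.2 - st.2)), p.2)
        | none => st)   -- Python raises IndexError here; excluded by Pre_
      ((PySem.Dict.empty : PySem.Dict Char Int), 0)).1.items).foldl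
      (fun (st : String × Int) (kv : Char × Int) =>
        if kv.2 > st.2 then (String.singleton kv.1, kv.2)
        else if kv.2 = st.2 ∧ st.1 < String.singleton kv.1 then (String.singleton kv.1, kv.2)
        else st)
      ("", 0)).1

-- ===== PORT B =====
def slowestKey_alt (releaseTimes : List Int) (keysPressed : String) : String :=
  -- single pass over enumerate(releaseTimes) with scalar state (answer, cur_max, prev)
  ((PySem.List.enumerate releaseTimes 0).foldl
    (fun (st : String × Int × Int) (p : Int × Int) =>
      match PySem.Str.pyGet? keysPressed p.1 with
      | some key =>
          let duration := p.2 - st.2.2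
          if duration > st.2.1 then (String.singleton key, duration, p.2)
          else if duration = st.2.1 ∧ st.1 < String.singleton key then (String.singleton key, st.2.1, p.2)
          else (st.1, st.2.1, p.2)
      | none => st)   -- Python raises IndexError here; excluded by Pre_
    ("", 0, 0)).1

-- ===== PRECONDITION & SPEC =====
-- durations of the presses: releaseTimes[i] - releaseTimes[i-1] (prev = 0 before the first)
def pvDur (prev : Int) : List Int → List Int
  | [] => []
  | t :: r => (t - prev) :: pvDur t r

-- Pre_ is exactly where the Python A returns: a nonempty press log with a key for every
-- release time, in which some press of the FIRST key has positive duration.  Outside it A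
-- raises (IndexError when keys run short; otherwise NameError: the first dict item then has
-- value 0 and A's elif reads the still-unbound 'answer').
def Pre_slowestKey (releaseTimes : List Int) (keysPressed : String) : Prop :=
  releaseTimes ≠ [] ∧ releaseTimes.length ≤ keysPressed.toList.length ∧
  ((pvDur 0 releaseTimes).zip keysPressed.toList).any
    (fun p => p.2 == keysPressed.toList.headI && decide (1 ≤ p.1)) = true
instance (releaseTimes : List Int) (keysPressed : String) : Decidable (Pre_slowestKey releaseTimes keysPressed) := by unfold Pre_slowestKey; infer_instance
def pvWitness_slowestKey : List Int × String := ([3, 5, 9], "aba")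

def Spec_slowestKey (releaseTimes : List Int) (keysPressed : String) (out : String) : Prop := out = slowestKey_alt releaseTimes keysPressed
instance (releaseTimes : List Int) (keysPressed : String) (out : String) : Decidable (Spec_slowestKey releaseTimes keysPressed out) := by unfold Spec_slowestKey; infer_instance

-- When no press of the first key has positive duration (including the empty list) A raises
-- NameError on its unbound 'answer' while B returns the single-pass winner ("" when empty).
def Raises_slowestKey (releaseTimes : List Int) (keysPressed : String) : Prop :=
  releaseTimes.length ≤ keysPressed.toList.length ∧
  ((pvDur 0 releaseTimes).zip keysPressed.toList).any
    (fun p => p.2 == keysPressed.toList.headI && decide (1 ≤ p.1)) = false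
instance (releaseTimes : List Int) (keysPressed : String) : Decidable (Raises_slowestKey releaseTimes keysPressed) := by unfold Raises_slowestKey; infer_instance
def pvRaiseWitness_slowestKey : List Int × String := ([-1, 2], "ab")
def pvRaiseWitnessOut_slowestKey : String := "b"

-- ===== CLAIM (what is proved, stated in full; the proofs are below) =====
def Claim_equal_slowestKey : Prop := ∀ (releaseTimes : List Int) (keysPressed : String), Dom_slowestKey releaseTimes keysPressed → Pre_slowestKey releaseTimes keysPressed → Spec_slowestKey releaseTimes keysPressed (slowestKey releaseTimes keysPressed)
def Claim_raises_slowestKey : Prop := (∀ (releaseTimes : List Int) (keysPressed : String), Dom_slowestKey releaseTimes keysPressed → Raises_slowestKey releaseTimes keysPressed → ¬ Pre_slowestKey releaseTimes keysPressed) ∧ (Dom_slowestKey (pvRaiseWitness_slowestKey.1) (pvRaiseWitness_slowestKey.2) ∧ Raises_slowestKey (pvRaiseWitness_slowestKey.1) (pvRaiseWitness_slowestKey.2) ∧ slowestKey_alt (pvRaiseWitness_slowestKey.1) (pvRaiseWitness_slowestKey.2) = pvRaiseWitnessOut_slowestKey)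

-- ===== LEMMAS AND PROOFS =====

-- Both loops compute the fold of the lexicographic max (duration first, then the key as a
-- one-character string; ties keep the earlier, equal, element) over their (value, key) lists.
def pvStep (s p : Int × String) : Int × String :=
  if p.1 > s.1 then p else if p.1 = s.1 ∧ s.2 < p.2 then p else s

-- (duration, key) pairs of the press log, threading prev
def pvDurC (prev : Int) : List (Int × Char) → List (Int × Char)
  | [] => []
  | (t, k) :: r => (t - prev, k) :: pvDurC t r

-- A's phase 1: per-key max aggregation over (duration, key) pairs
def pvAgg (d : PySem.Dict Char Int) : List (Int × Char) → PySem.Dict Char Int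
  | [] => d
  | (v, k) :: r => pvAgg (d.insert k (max (d.getD k 0) v)) r

-- running max of the durations of key k, seeded with m
def pvKM (m : Int) (k : Char) : List (Int × Char) → Int
  | [] => m
  | p :: r => pvKM (if p.2 = k then max m p.1 else m) k r

def pvConv (kv : Char × Int) : Int × String := (kv.2, String.singleton kv.1)
def pvInj (p : Int × Char) : Int × String := (p.1, String.singleton p.2)

lemma pvDurC_eq_zip (rt : List Int) (ks : List Char) (prev : Int) :
    pvDurC prev (rt.zip ks) = (pvDur prev rt).zip ks := by
  induction rt generalizing ks prev with
  | nil => rfl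
  | cons t r ih =>
      cases ks with
      | nil => rfl
      | cons k ks => simp [pvDurC, pvDur, ih]

lemma pvStep_eq_max (s p : Int × String) :
    pvStep s p = ofLex (max (toLex p) (toLex s)) := by
  unfold pvStep
  rw [max_def]
  by_cases hd : toLex p ≤ toLex s
  · rw [if_pos hd]
    rw [Prod.Lex.toLex_le_toLex] at hd
    split_ifs with h1 h2
    · exfalso; rcases hd with h | ⟨h, h'⟩
      · omega
      · omega
    · exfalso; rcases hd with h | ⟨h, h'⟩
      · omega
      · exact absurd h2.2 (not_lt.mpr h')
    · rfl
  · rw [if_neg hd]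
    rw [Prod.Lex.toLex_le_toLex] at hd
    push Not at hd
    obtain ⟨hd1, hd2⟩ := hd
    split_ifs with h1 h2
    · rfl
    · rfl
    · exact absurd ⟨by omega, hd2 (by omega)⟩ h2

lemma pvToLex_step (s p : Int × String) :
    toLex (pvStep s p) = max (toLex p) (toLex s) := by
  rw [pvStep_eq_max, toLex_ofLex]

lemma pvFold_ge_init (l : List (Int × String)) (i : Int × String) :
    toLex i ≤ toLex (l.foldl pvStep i) := by
  induction l generalizing i with
  | nil => exact le_refl _
  | cons x l ih =>
      refine le_trans ?_ (ih (pvStep i x))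
      rw [pvToLex_step]
      exact le_max_right _ _

lemma pvFold_ge_mem (l : List (Int × String)) (i x : Int × String) (hx : x ∈ l) :
    toLex x ≤ toLex (l.foldl pvStep i) := by
  induction l generalizing i with
  | nil => cases hx
  | cons y l ih =>
      rcases List.mem_cons.mp hx with h | h
      · subst h
        refine le_trans ?_ (pvFold_ge_init l (pvStep i x))
        rw [pvToLex_step]
        exact le_max_left _ _
      · exact ih _ h

lemma pvFold_le (l : List (Int × String)) (i : Int × String) (m : Lex (Int × String))
    (h0 : toLex i ≤ m) (h : ∀ x ∈ l, toLex x ≤ m) :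
    toLex (l.foldl pvStep i) ≤ m := by
  induction l generalizing i with
  | nil => exact h0
  | cons x l ih =>
      refine ih (pvStep i x) ?_ (fun y hy => h y (List.mem_cons_of_mem _ hy))
      rw [pvToLex_step]
      exact max_le (h x (List.mem_cons_self ..)) h0

lemma pvAgg_getD (q : List (Int × Char)) (d : PySem.Dict Char Int) (k : Char) :
    (pvAgg d q).getD k 0 = pvKM (d.getD k 0) k q := by
  induction q generalizing d with
  | nil => rfl
  | cons p r ih =>
      obtain ⟨v, k'⟩ := p
      simp only [pvAgg, pvKM, ih]
      rw [PySem.Dict.getD_insert]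
      by_cases h : k = k'
      · subst h; simp
      · simp [h, Ne.symm h]

lemma pvAgg_nodup (q : List (Int × Char)) (d : PySem.Dict Char Int) (h : d.keys.Nodup) :
    (pvAgg d q).keys.Nodup := by
  induction q generalizing d with
  | nil => exact h
  | cons p r ih =>
      obtain ⟨v, k'⟩ := p
      exact ih _ (PySem.Dict.nodup_keys_insert d k' _ h)

lemma pvAgg_contains_mono (q : List (Int × Char)) (d : PySem.Dict Char Int) (k : Char)
    (h : d.contains k = true) : (pvAgg d q).contains k = true := by
  induction q generalizing d with
  | nil => exact h
  | cons p r ih =>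
      obtain ⟨v, k'⟩ := p
      refine ih _ ?_
      rw [PySem.Dict.contains_insert]
      simp [h]

lemma pvAgg_contains_of_mem (q : List (Int × Char)) (d : PySem.Dict Char Int)
    (p : Int × Char) (hp : p ∈ q) : (pvAgg d q).contains p.2 = true := by
  induction q generalizing d with
  | nil => cases hp
  | cons y r ih =>
      obtain ⟨v, k'⟩ := y
      rcases List.mem_cons.mp hp with h | h
      · subst h
        exact pvAgg_contains_mono r _ _ (PySem.Dict.contains_insert_self ..)
      · exact ih _ h

lemma pvKM_ge (m : Int) (k : Char) (q : List (Int × Char)) : m ≤ pvKM m k q := by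
  induction q generalizing m with
  | nil => exact le_refl _
  | cons p r ih =>
      refine le_trans ?_ (ih _)
      split_ifs
      · exact le_max_left _ _
      · exact le_refl _

lemma pvKM_ge_mem (m : Int) (k : Char) (q : List (Int × Char)) (v : Int)
    (hv : (v, k) ∈ q) : v ≤ pvKM m k q := by
  induction q generalizing m with
  | nil => cases hv
  | cons p r ih =>
      rcases List.mem_cons.mp hv with h | h
      · refine le_trans ?_ (pvKM_ge _ k r)
        rw [← h]
        simp
      · exact ih _ h

lemma pvKM_cases (m : Int) (k : Char) (q : List (Int × Char)) :
    pvKM m k q = m ∨ ∃ v, (v, k) ∈ q ∧ pvKM m k q = v := by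
  induction q generalizing m with
  | nil => exact Or.inl rfl
  | cons p r ih =>
      obtain ⟨v', k'⟩ := p
      simp only [pvKM]
      by_cases hk : k' = k
      · subst hk
        rw [if_pos rfl]
        rcases ih (max m v') with h | ⟨w, hw, hh⟩
        · rcases max_cases m v' with ⟨he, _⟩ | ⟨he, _⟩
          · exact Or.inl (h.trans he)
          · exact Or.inr ⟨v', by simp, h.trans he⟩
        · exact Or.inr ⟨w, List.mem_cons_of_mem _ hw, hh⟩
      · simp only [if_neg hk]
        rcases ih m with h | ⟨w, hw, hh⟩
        · exact Or.inl h
        · exact Or.inr ⟨w, List.mem_cons_of_mem _ hw, hh⟩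

-- A's dict scan, rephrased
lemma pvScanA (l : List (Char × Int)) (a : String) (m : Int) :
    l.foldl
      (fun (st : String × Int) (kv : Char × Int) =>
        if kv.2 > st.2 then (String.singleton kv.1, kv.2)
        else if kv.2 = st.2 ∧ st.1 < String.singleton kv.1 then (String.singleton kv.1, kv.2)
        else st) (a, m)
    = ((l.map pvConv).foldl pvStep (m, a)).swap := by
  induction l generalizing a m with
  | nil => rfl
  | cons kv l ih =>
      simp only [List.foldl, List.map]
      rw [show (if kv.2 > m then (String.singleton kv.1, kv.2)
          else if kv.2 = m ∧ a < String.singleton kv.1 then (String.singleton kv.1, kv.2)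
          else (a, m)) = ((pvStep (m, a) (pvConv kv)).2, (pvStep (m, a) (pvConv kv)).1) from by
        unfold pvStep pvConv; dsimp only; split_ifs <;> simp_all]
      exact ih _ _

-- B's loop, rephrased
lemma pvScanB (rt : List Int) (pre suf : List Char) (ks : String)
    (hks : ks.toList = pre ++ suf) (hlen : rt.length ≤ suf.length)
    (a : String) (m prev : Int) :
    ((PySem.List.enumerate rt (pre.length : Int)).foldl
      (fun (st : String × Int × Int) (p : Int × Int) =>
        match PySem.Str.pyGet? ks p.1 with
        | some key =>
            let duration := p.2 - st.2.2
            if duration > st.2.1 then (String.singleton key, duration, p.2)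
            else if duration = st.2.1 ∧ st.1 < String.singleton key then (String.singleton key, st.2.1, p.2)
            else (st.1, st.2.1, p.2)
        | none => st) (a, m, prev)).1
    = (((pvDurC prev (rt.zip suf)).map pvInj).foldl pvStep (m, a)).2 := by
  induction rt generalizing pre suf a m prev with
  | nil => rfl
  | cons t rt ih =>
      cases suf with
      | nil => simp at hlen
      | cons k suf' =>
          rw [PySem.List.enumerate_cons]
          simp only [List.foldl_cons]
          have hget : PySem.Str.pyGet? ks ((pre.length : Nat) : Int) = some k := by
            rw [PySem.Str.pyGet?_natCast, hks]
            rw [List.getElem?_append_right (le_refl pre.length)]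
            simp
          rw [hget]
          have hcast : (pre.length : Int) + 1 = ((pre ++ [k]).length : Int) := by
            simp
          dsimp only
          rw [show (if t - prev > m then (String.singleton k, t - prev, t)
              else if t - prev = m ∧ a < String.singleton k then (String.singleton k, m, t)
              else (a, m, t))
              = ((pvStep (m, a) (pvInj (t - prev, k))).2, (pvStep (m, a) (pvInj (t - prev, k))).1, t) from by
            unfold pvStep pvInj; dsimp only; split_ifs <;> simp_all]
          rw [hcast, ih (pre ++ [k]) suf' (by simp [hks]) (by simpa using hlen)]
          simp only [List.zip_cons_cons, pvDurC, List.map_cons, List.foldl_cons]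

-- A's phase-1 loop over enumerate equals pvAgg over the zipped press list
lemma pvBuildA (rt : List Int) (pre suf : List Char) (ks : String)
    (hks : ks.toList = pre ++ suf) (hlen : rt.length ≤ suf.length)
    (d : PySem.Dict Char Int) (prev : Int) :
    (PySem.List.enumerate rt (pre.length : Int)).foldl
      (fun (st : PySem.Dict Char Int × Int) (p : Int × Int) =>
        match PySem.Str.pyGet? ks p.1 with
        | some k => (st.1.insert k (max (st.1.getD k 0) (p.2 - st.2)), p.2)
        | none => st) (d, prev)
    = (pvAgg d (pvDurC prev (rt.zip suf)), rt.getLastD prev) := by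
  induction rt generalizing pre suf d prev with
  | nil => simp [PySem.List.enumerate_nil, pvAgg, pvDurC]
  | cons t rt ih =>
      cases suf with
      | nil => simp at hlen
      | cons k suf' =>
          rw [PySem.List.enumerate_cons]
          simp only [List.foldl_cons]
          have hget : PySem.Str.pyGet? ks ((pre.length : Nat) : Int) = some k := by
            rw [PySem.Str.pyGet?_natCast, hks]
            rw [List.getElem?_append_right (le_refl pre.length)]
            simp
          rw [hget]
          have hcast : (pre.length : Int) + 1 = ((pre ++ [k]).length : Int) := by
            simp
          rw [hcast, ih (pre ++ [k]) suf' (by simp [hks]) (by simpa using hlen)]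
          simp only [List.zip_cons_cons, pvDurC, pvAgg, List.getLastD_cons]

-- the crux: folding pvStep over the aggregated dict items equals folding it over the raw
-- press list, as soon as some press has positive duration
lemma pvMain (q : List (Int × Char)) (h : ∃ p ∈ q, 0 < p.1) :
    ((pvAgg PySem.Dict.empty q).items.map pvConv).foldl pvStep ((0 : Int), "")
      = (q.map pvInj).foldl pvStep ((0 : Int), "") := by
  obtain ⟨p0, hp0, hpos0⟩ := h
  have hnd : (pvAgg PySem.Dict.empty q).keys.Nodup :=
    pvAgg_nodup q _ PySem.Dict.nodup_keys_empty
  -- any pair with first component 0 is below B's fold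
  have hvB : ∀ s : String,
      toLex ((0 : Int), s) ≤ toLex ((q.map pvInj).foldl pvStep ((0 : Int), "")) := by
    intro s
    refine le_trans ?_ (pvFold_ge_mem _ _ _ (List.mem_map.mpr ⟨p0, hp0, rfl⟩))
    rw [Prod.Lex.toLex_le_toLex]
    exact Or.inl hpos0
  have hAB : toLex (((pvAgg PySem.Dict.empty q).items.map pvConv).foldl pvStep ((0 : Int), ""))
      ≤ toLex ((q.map pvInj).foldl pvStep ((0 : Int), "")) := by
    refine pvFold_le _ _ _ (hvB "") ?_
    intro x hx
    obtain ⟨⟨k, v⟩, hkv, rfl⟩ := List.mem_map.mp hx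
    have hv : v = pvKM 0 k q := by
      have := PySem.Dict.getD_of_mem_items _ hkv hnd 0
      rw [pvAgg_getD, PySem.Dict.getD_empty] at this
      exact this.symm
    rcases pvKM_cases 0 k q with hc | ⟨w, hw, hww⟩
    · rw [show pvConv (k, v) = ((0 : Int), String.singleton k) from by
        simp [pvConv, hv, hc]]
      exact hvB _
    · rw [show pvConv (k, v) = pvInj (w, k) from by simp [pvConv, pvInj, hv, hww]]
      exact pvFold_ge_mem _ _ _ (List.mem_map.mpr ⟨(w, k), hw, rfl⟩)
  have hBA : toLex ((q.map pvInj).foldl pvStep ((0 : Int), ""))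
      ≤ toLex (((pvAgg PySem.Dict.empty q).items.map pvConv).foldl pvStep ((0 : Int), "")) := by
    refine pvFold_le _ _ _ (pvFold_ge_init _ _) ?_
    intro x hx
    obtain ⟨⟨v, k⟩, hvk, rfl⟩ := List.mem_map.mp hx
    have hck : (pvAgg PySem.Dict.empty q).contains k = true :=
      pvAgg_contains_of_mem q _ (v, k) hvk
    have hmemit : (k, (pvAgg PySem.Dict.empty q).getD k 0) ∈ (pvAgg PySem.Dict.empty q).items := by
      rw [PySem.Dict.items_eq_map_keys _ hnd 0]
      exact List.mem_map.mpr ⟨k, (PySem.Dict.contains_iff_mem_keys ..).mp hck, rfl⟩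
    refine le_trans ?_ (pvFold_ge_mem _ _ _ (List.mem_map.mpr ⟨_, hmemit, rfl⟩))
    rw [Prod.Lex.toLex_le_toLex]
    have hle : v ≤ (pvAgg PySem.Dict.empty q).getD k 0 := by
      rw [pvAgg_getD, PySem.Dict.getD_empty]
      exact pvKM_ge_mem 0 k q v hvk
    rcases lt_or_eq_of_le hle with hlt | heq
    · exact Or.inl hlt
    · exact Or.inr ⟨heq, le_refl _⟩
  have := le_antisymm hAB hBA
  have h2 := congrArg ofLex this
  simpa using h2

-- ===== VERDICT (by name: the statement is the Claim_ definition above) =====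
theorem slowestKey_spec : Claim_equal_slowestKey := by
  intro rt ks _ hpre
  obtain ⟨hne, hlen, hany⟩ := hpre
  unfold Spec_slowestKey slowestKey slowestKey_alt
  have hsb := pvScanB rt [] ks.toList ks (by simp) hlen "" 0 0
  simp only [List.length_nil, Nat.cast_zero] at hsb
  rw [hsb]
  have hb := pvBuildA rt [] ks.toList ks (by simp) hlen PySem.Dict.empty 0
  simp only [List.length_nil, Nat.cast_zero] at hb
  rw [hb, pvScanA]
  simp only [Prod.fst_swap]
  have hpos : ∃ p ∈ pvDurC 0 (rt.zip ks.toList), 0 < p.1 := by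
    rw [pvDurC_eq_zip]
    obtain ⟨p, hp, hcond⟩ := List.any_eq_true.mp hany
    simp only [Bool.and_eq_true, decide_eq_true_eq] at hcond
    exact ⟨p, hp, by omega⟩
  rw [pvMain _ hpos]

theorem slowestKey_raises : Claim_raises_slowestKey := by
  unfold Claim_raises_slowestKey
  refine ⟨?_, by decide⟩
  intro rt ks _ hr hpre
  unfold Raises_slowestKey at hr
  unfold Pre_slowestKey at hpre
  rw [hpre.2.2] at hr
  exact absurd hr.2 (by simp)

-- self-check: the raise witness really lies inside Raises_ (read off the raises theorem)
theorem pvRaiseWitness_ok : Raises_slowestKey pvRaiseWitness_slowestKey.1 pvRaiseWitness_slowestKey.2 :=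
  slowestKey_raises.2.2.1
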